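-- pv_equiv track=rewrite | github.com/heliziii/NLP-Fall2019 | phase_1/english.py | find_window
-- ===== SOURCE A (Python) =====
-- def find_window(post, k):
-- 	alls = []
-- 	index = 0
-- 	for l in post:
-- 		for i in l:
-- 			alls.append((i, index))
-- 		index += 1
-- 	alls.sort()
-- 	mark = [0 for i in range(len(post))]
-- 	en, cnt = 0, 0
-- 	for st in range(len(alls)):
-- 		while en < len(alls) and alls[en][0] - alls[st][0] <= k:
-- 			mark[alls[en][1]] += 1
-- 			if mark[alls[en][1]] == 1:
-- 				cnt += 1
-- 			en += 1
-- 		if cnt == len(post):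
-- 			return True
-- 		mark[alls[st][1]] -= 1
-- 		if mark[alls[st][1]] == 0:
-- 			cnt -= 1
-- 	return False
-- ===== SOURCE B (Python) =====
-- def find_window(post, k):
--     return any(
--         all(any(x <= y <= x + k for y in l) for l in post)
--         for row in post
--         for x in row
--     )
-- ===== Notes on version B (the rewrite author's own statement) =====
-- stated objective: simpler
-- what changed: Replaced the sort + two-pointer sliding-window with mark counters by a direct short-circuiting existential: some element x is the low end of a window [x, x+k] in which every list has an element.
import Mathlib
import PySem

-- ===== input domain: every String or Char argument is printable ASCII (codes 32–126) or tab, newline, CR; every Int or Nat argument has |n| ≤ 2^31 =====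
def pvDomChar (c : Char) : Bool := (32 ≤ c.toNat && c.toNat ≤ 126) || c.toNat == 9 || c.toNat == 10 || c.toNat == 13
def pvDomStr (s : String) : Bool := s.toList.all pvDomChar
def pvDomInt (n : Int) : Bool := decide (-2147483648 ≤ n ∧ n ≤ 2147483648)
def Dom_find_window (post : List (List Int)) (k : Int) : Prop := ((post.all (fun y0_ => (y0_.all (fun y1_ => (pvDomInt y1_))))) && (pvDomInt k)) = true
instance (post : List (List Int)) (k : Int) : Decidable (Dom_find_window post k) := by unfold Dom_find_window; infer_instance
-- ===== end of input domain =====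

-- B replaces A's sort + two-pointer sliding window by a plain brute-force existential
-- (some element x starts a window [x, x+k] meeting every list); objective: simpler.

-- ===== PORT A =====
-- while en < len(alls) and alls[en][0] - alls[st][0] <= k: ...   (fuel = len(alls) always suffices)
def fwWhile (alls : List (Int × Int)) (stval k : Int) :
    Nat → List Int → Nat → Int → List Int × Nat × Int
  | 0, mark, en, cnt => (mark, en, cnt)
  | fuel + 1, mark, en, cnt =>
    if en < alls.length && decide ((alls.getD en (0, 0)).1 - stval ≤ k) then
      let j := (alls.getD en (0, 0)).2.toNat
      let mark' := mark.set j (mark.getD j 0 + 1)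
      let cnt' := if mark'.getD j 0 = 1 then cnt + 1 else cnt
      fwWhile alls stval k fuel mark' (en + 1) cnt'
    else (mark, en, cnt)

-- for st in range(len(alls)): ...
def fwLoop (alls : List (Int × Int)) (k : Int) (m : Nat) :
    List Nat → List Int → Nat → Int → Bool
  | [], _, _, _ => false
  | st :: rest, mark, en, cnt =>
    let stval := (alls.getD st (0, 0)).1
    let r := fwWhile alls stval k alls.length mark en cnt
    if r.2.2 = (m : Int) then true
    else
      let j := (alls.getD st (0, 0)).2.toNat
      let mark'' := r.1.set j (r.1.getD j 0 - 1)
      let cnt'' := if mark''.getD j 0 = 0 then r.2.2 - 1 else r.2.2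
      fwLoop alls k m rest mark'' r.2.1 cnt''

def find_window (post : List (List Int)) (k : Int) : Bool :=
  let alls0 := (post.foldl (fun (acc : List (Int × Int) × Int) l =>
      (l.foldl (fun a i => a ++ [(i, acc.2)]) acc.1, acc.2 + 1)) ([], 0)).1
  let alls := PySem.List.sorted2 alls0 Prod.fst Prod.snd
  fwLoop alls k post.length (List.range alls.length) (List.replicate post.length (0 : Int)) 0 0

-- ===== PORT B =====
def find_window_alt (post : List (List Int)) (k : Int) : Bool :=
  post.any (fun row => row.any (fun x =>
    post.all (fun l => l.any (fun y => decide (x ≤ y) && decide (y ≤ x + k)))))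

-- ===== PRECONDITION & SPEC =====
def Spec_find_window (post : List (List Int)) (k : Int) (out : Bool) : Prop := out = find_window_alt post k
instance (post : List (List Int)) (k : Int) (out : Bool) : Decidable (Spec_find_window post k out) := by unfold Spec_find_window; infer_instance

-- ===== CLAIM (what is proved, stated in full; the proofs are below) =====
def Claim_equal_find_window : Prop := ∀ (post : List (List Int)) (k : Int), Dom_find_window post k → Spec_find_window post k (find_window post k)

-- ===== LEMMAS AND PROOFS =====

-- the comparator sorted2 … Prod.fst Prod.snd sorts by (lexicographic tuple order)
def fwBefore (a b : Int × Int) : Bool :=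
  decide (a.1 < b.1) || (!decide (b.1 < a.1) && decide (a.2 < b.2))

-- number of elements of list j among the first p entries of alls
def cntIdx (alls : List (Int × Int)) (j : Nat) (p : Nat) : Nat :=
  (alls.take p).countP (fun a => decide (a.2 = (j : Int)))

-- number of entries with value ≤ thr (a prefix, once alls is sorted by value)
def fB (alls : List (Int × Int)) (thr : Int) : Nat :=
  (alls.takeWhile (fun a => decide (a.1 ≤ thr))).length

def countGood (mark : List Int) : Nat := mark.countP (fun v => decide (1 ≤ v))

-- "the window starting at sorted position t covers every list"
def GoodT (alls : List (Int × Int)) (k : Int) (m t : Nat) : Prop :=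
  ∀ j, j < m → cntIdx alls j t < cntIdx alls j (fB alls ((alls.getD t (0, 0)).1 + k))

def allsSpec : List (List Int) → Int → List (Int × Int)
  | [], _ => []
  | l :: rest, i0 => l.map (fun v => (v, i0)) ++ allsSpec rest (i0 + 1)

-- ---- sortedness of the port's sort ----

lemma insertBy_cons (before : (Int × Int) → (Int × Int) → Bool) (x y : Int × Int) (ys : List (Int × Int)) :
    PySem.List.insertBy before x (y :: ys) =
    if before x y then x :: y :: ys else y :: PySem.List.insertBy before x ys := rfl

lemma fwBefore_asymm {a b : Int × Int} (h : fwBefore a b = true) : fwBefore b a = false := by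
  simp only [fwBefore] at *
  rcases Bool.or_eq_true .. |>.mp h with h1 | h1 <;>
    simp_all <;> omega

lemma fwBefore_trans_neg {x y z : Int × Int} (h1 : fwBefore x y = true) (h2 : fwBefore z y = false) :
    fwBefore z x = false := by
  simp only [fwBefore] at *
  simp_all
  omega

lemma pairwise_insertBy (x : Int × Int) (ys : List (Int × Int))
    (h : ys.Pairwise (fun a b => fwBefore b a = false)) :
    (PySem.List.insertBy fwBefore x ys).Pairwise (fun a b => fwBefore b a = false) := by
  induction ys with
  | nil => simp [PySem.List.insertBy]
  | cons y ys ih =>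
    rw [insertBy_cons]
    rcases List.pairwise_cons.mp h with ⟨hy, hys⟩
    by_cases hb : fwBefore x y = true
    · simp only [hb, if_pos]
      refine List.pairwise_cons.mpr ⟨?_, h⟩
      intro z hz
      rcases List.mem_cons.mp hz with rfl | hz
      · exact fwBefore_asymm hb
      · exact fwBefore_trans_neg hb (hy z hz)
    · have hb' : fwBefore x y = false := Bool.not_eq_true _ |>.mp hb
      simp only [hb', Bool.false_eq_true, if_neg, if_false]
      refine List.pairwise_cons.mpr ⟨?_, ih hys⟩
      intro z hz
      rcases (PySem.List.mem_insertBy fwBefore x z ys).mp hz with rfl | hz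
      · exact hb'
      · exact hy z hz

lemma sorted2_pairwise (xs : List (Int × Int)) :
    (PySem.List.sorted2 xs Prod.fst Prod.snd).Pairwise (fun a b : Int × Int => a.1 ≤ b.1) := by
  have key : ∀ (l : List (Int × Int)) (acc : List (Int × Int)),
      acc.Pairwise (fun a b => fwBefore b a = false) →
      (l.foldl (fun acc x => PySem.List.insertBy fwBefore x acc) acc).Pairwise
        (fun a b => fwBefore b a = false) := by
    intro l
    induction l with
    | nil => intro acc h; exact h
    | cons x l ih => intro acc h; exact ih _ (pairwise_insertBy x acc h)
  have h0 : (PySem.List.sorted2 xs Prod.fst Prod.snd) =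
      xs.foldl (fun acc x => PySem.List.insertBy fwBefore x acc) [] := rfl
  rw [h0]
  refine (key xs [] (List.Pairwise.nil)).imp ?_
  intro a b hab
  simp only [fwBefore] at hab
  rcases Bool.or_eq_false_iff.mp hab with ⟨h1, _⟩
  exact Int.not_lt.mp (by simpa using h1)

-- ---- building alls ----

lemma foldl_append_map (l : List Int) (c : Int) :
    ∀ acc : List (Int × Int), l.foldl (fun a i => a ++ [(i, c)]) acc = acc ++ l.map (fun i => (i, c)) := by
  induction l with
  | nil => simp
  | cons x l ih => intro acc; simp [ih]

lemma build_alls (post : List (List Int)) :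
    ∀ (acc : List (Int × Int)) (c : Int),
      (post.foldl (fun (acc : List (Int × Int) × Int) l =>
        (l.foldl (fun a i => a ++ [(i, acc.2)]) acc.1, acc.2 + 1)) (acc, c)).1
      = acc ++ allsSpec post c := by
  induction post with
  | nil => simp [allsSpec]
  | cons l post ih =>
    intro acc c
    rw [List.foldl_cons]
    show (List.foldl _ (l.foldl (fun a i => a ++ [(i, c)]) acc, c + 1) post).1 = _
    rw [foldl_append_map, ih, allsSpec]
    simp

lemma mem_allsSpec (post : List (List Int)) :
    ∀ (i0 : Int) (v j : Int), (v, j) ∈ allsSpec post i0 ↔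
      ∃ (t : Nat) (ht : t < post.length), j = i0 + (t : Int) ∧ v ∈ post[t] := by
  induction post with
  | nil => simp [allsSpec]
  | cons l post ih =>
    intro i0 v j
    simp only [allsSpec, List.mem_append, List.mem_map, ih]
    constructor
    · rintro (⟨w, hw, heq⟩ | ⟨t, ht, rfl, hv⟩)
      · rcases Prod.mk.injEq .. ▸ heq with ⟨rfl, rfl⟩
        exact ⟨0, by simp, by simp, by simpa using hw⟩
      · exact ⟨t + 1, by simpa using ht, by push_cast; ring, by simpa using hv⟩
    · rintro ⟨t, ht, rfl, hv⟩
      cases t with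
      | zero => exact Or.inl ⟨v, by simpa using hv, by simp⟩
      | succ t =>
        refine Or.inr ⟨t, by simpa using ht, by push_cast; ring, by simpa using hv⟩

-- ---- prefix / counting lemmas ----

lemma takeWhile_getD_true (p : (Int × Int) → Bool) (l : List (Int × Int)) :
    ∀ (i : Nat), i < (l.takeWhile p).length → p (l.getD i (0, 0)) = true := by
  induction l with
  | nil => intro i h; simp at h
  | cons a l ih =>
    intro i h
    cases hp : p a with
    | true =>
      cases i with
      | zero => simpa using hp
      | succ i =>
        simp only [List.takeWhile_cons, hp, if_pos, List.length_cons, Nat.add_lt_add_iff_right] at h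
        simpa using ih i h
    | false =>
      rw [List.takeWhile_cons, hp] at h
      simp at h

lemma takeWhile_getD_false (p : (Int × Int) → Bool) (l : List (Int × Int))
    (h : (l.takeWhile p).length < l.length) :
    p (l.getD (l.takeWhile p).length (0, 0)) = false := by
  induction l with
  | nil => simp at h
  | cons a l ih =>
    cases hp : p a with
    | true =>
      have hlen : ((a :: l).takeWhile p).length = (l.takeWhile p).length + 1 := by
        simp [List.takeWhile_cons, hp]
      rw [hlen]
      rw [hlen] at h
      simpa using ih (by simpa using h)
    | false =>
      have hlen : ((a :: l).takeWhile p).length = 0 := by simp [List.takeWhile_cons, hp]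
      rw [hlen]
      simpa using hp

lemma fB_le (alls : List (Int × Int)) (thr : Int) : fB alls thr ≤ alls.length :=
  (alls.takeWhile_sublist _).length_le

lemma prefix_iff (alls : List (Int × Int)) (hs : alls.Pairwise (fun a b : Int × Int => a.1 ≤ b.1))
    (thr : Int) (p : Nat) (hp : p < alls.length) :
    alls[p].1 ≤ thr ↔ p < fB alls thr := by
  constructor
  · intro h
    by_contra hlt
    have hlt' : fB alls thr ≤ p := by omega
    have hF : fB alls thr < alls.length := lt_of_le_of_lt hlt' hp
    have hfail := takeWhile_getD_false (fun a => decide (a.1 ≤ thr)) alls hF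
    rw [show (alls.takeWhile (fun a => decide (a.1 ≤ thr))).length = fB alls thr from rfl,
      List.getD_eq_getElem _ _ hF] at hfail
    simp only [decide_eq_false_iff_not, not_le] at hfail
    rcases Nat.lt_or_ge (fB alls thr) p with hlt2 | hge
    · have := List.pairwise_iff_getElem.mp hs _ _ hF hp hlt2
      omega
    · have heq : fB alls thr = p := le_antisymm hlt' hge
      subst heq
      exact absurd h (not_le.mpr hfail)
  · intro h
    have := takeWhile_getD_true (fun a => decide (a.1 ≤ thr)) alls p h
    rw [List.getD_eq_getElem _ _ hp] at this
    simpa using this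

lemma fB_mono (alls : List (Int × Int)) {thr thr' : Int} (h : thr ≤ thr') :
    fB alls thr ≤ fB alls thr' := by
  unfold fB
  induction alls with
  | nil => simp
  | cons a l ih =>
    by_cases ha : a.1 ≤ thr
    · have ha' : a.1 ≤ thr' := le_trans ha h
      simp [List.takeWhile_cons, ha, ha', ih]
    · simp [List.takeWhile_cons, ha]

lemma cntIdx_zero (alls : List (Int × Int)) (j : Nat) : cntIdx alls j 0 = 0 := by
  simp [cntIdx]

lemma cntIdx_succ (alls : List (Int × Int)) (j : Nat) (p : Nat) (hp : p < alls.length) :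
    cntIdx alls j (p + 1) = cntIdx alls j p + if alls[p].2 = (j : Int) then 1 else 0 := by
  unfold cntIdx
  rw [List.take_add_one, List.getElem?_eq_getElem hp]
  simp only [Option.toList_some, List.countP_append, List.countP_cons, List.countP_nil]
  split_ifs with h <;> simp_all

lemma cntIdx_mono (alls : List (Int × Int)) (j : Nat) {a b : Nat} (h : a ≤ b) :
    cntIdx alls j a ≤ cntIdx alls j b := by
  unfold cntIdx
  have heq : alls.take a = (alls.take b).take a := by
    rw [List.take_take]
    congr 1
    omega
  rw [heq]
  exact List.Sublist.countP_le ((alls.take b).take_sublist a)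

lemma cntIdx_lt_iff (alls : List (Int × Int)) (j : Nat) (a b : Nat) (hb : b ≤ alls.length) :
    cntIdx alls j a < cntIdx alls j b ↔
    ∃ (p : Nat) (hp : p < alls.length), a ≤ p ∧ p < b ∧ alls[p].2 = (j : Int) := by
  constructor
  · intro h
    have hab : a ≤ b := by
      by_contra hab
      exact absurd (cntIdx_mono alls j (le_of_not_ge hab)) (by omega)
    have h1 : List.take a alls = List.take a (List.take b alls) := by
      rw [List.take_take]
      congr 1
      omega
    have hsplit : alls.take b = alls.take a ++ (alls.take b).drop a := by
      conv_lhs => rw [← List.take_append_drop a (List.take b alls)]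
      rw [← h1]
    have hpos : 0 < ((alls.take b).drop a).countP (fun x => decide (x.2 = (j : Int))) := by
      have := congrArg (List.countP (fun x => decide (x.2 = (j : Int)))) hsplit
      rw [List.countP_append] at this
      unfold cntIdx at h
      omega
    rcases List.countP_pos_iff.mp hpos with ⟨x, hx, hpx⟩
    rcases List.mem_iff_getElem.mp hx with ⟨i, hi, hxi⟩
    have hlen : ((alls.take b).drop a).length = b - a := by
      simp [Nat.min_eq_left hb]
    have hib : a + i < b := by omega
    have hpa : a + i < alls.length := by omega
    refine ⟨a + i, hpa, Nat.le_add_right a i, hib, ?_⟩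
    have hgd : ((alls.take b).drop a)[i] = alls[a + i] := by
      rw [List.getElem_drop, List.getElem_take]
    have hxa : alls[a + i] = x := by rw [← hgd]; exact hxi
    rw [hxa]
    simpa using hpx
  · rintro ⟨p, hp, hap, hpb, hj⟩
    have h1 : List.take a alls = List.take a (List.take b alls) := by
      rw [List.take_take]
      congr 1
      omega
    have hsplit : alls.take b = alls.take a ++ (alls.take b).drop a := by
      conv_lhs => rw [← List.take_append_drop a (List.take b alls)]
      rw [← h1]
    have hpos : 0 < ((alls.take b).drop a).countP (fun x => decide (x.2 = (j : Int))) := by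
      refine List.countP_pos_iff.mpr ⟨alls[p], ?_, by simpa using hj⟩
      have hlen : ((alls.take b).drop a).length = b - a := by
        simp [Nat.min_eq_left hb]
      refine List.mem_iff_getElem.mpr ⟨p - a, by omega, ?_⟩
      rw [List.getElem_drop, List.getElem_take]
      congr 1
      omega
    have := congrArg (List.countP (fun x => decide (x.2 = (j : Int)))) hsplit
    rw [List.countP_append] at this
    unfold cntIdx
    omega

lemma countGood_set (mark : List Int) :
    ∀ (j : Nat) (hj : j < mark.length) (v : Int),
    countGood (mark.set j v) + (if 1 ≤ mark[j] then 1 else 0) =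
    countGood mark + (if 1 ≤ v then 1 else 0) := by
  induction mark with
  | nil => intro j hj v; simp at hj
  | cons a l ih =>
    intro j hj v
    cases j with
    | zero =>
      simp only [List.set_cons_zero, countGood, List.countP_cons, List.getElem_cons_zero]
      split_ifs <;> simp_all <;> omega
    | succ j =>
      have hj' : j < l.length := by simpa using hj
      have := ih j hj' v
      simp only [List.set_cons_succ, countGood, List.countP_cons, List.getElem_cons_succ] at *
      split_ifs at * <;> omega

lemma countGood_replicate (m : Nat) : countGood (List.replicate m (0 : Int)) = 0 := by
  induction m with
  | zero => simp [countGood]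
  | succ m ih => simpa [countGood, List.replicate_succ, List.countP_cons] using ih

lemma getD_set_self (mark : List Int) (j : Nat) (hj : j < mark.length) (v : Int) :
    (mark.set j v).getD j 0 = v := by
  rw [List.getD_eq_getElem _ _ (by simpa using hj)]
  simp [List.getElem_set_self]

lemma getD_set_ne (mark : List Int) (j j' : Nat) (hne : j ≠ j') (v : Int) :
    (mark.set j v).getD j' 0 = mark.getD j' 0 := by
  by_cases hj' : j' < mark.length
  · rw [List.getD_eq_getElem _ _ (by simpa using hj'), List.getD_eq_getElem _ _ hj']
    exact List.getElem_set_ne hne _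
  · have h1 : mark.getD j' 0 = 0 := List.getD_eq_default _ _ (by omega)
    have h2 : (mark.set j v).getD j' 0 = 0 := List.getD_eq_default _ _ (by simpa using (by omega : mark.length ≤ j'))
    rw [h1, h2]

-- ---- the while loop ----

lemma fwWhile_spec (alls : List (Int × Int)) (m : Nat)
    (hs : alls.Pairwise (fun a b : Int × Int => a.1 ≤ b.1))
    (hidx : ∀ pr ∈ alls, 0 ≤ pr.2 ∧ pr.2.toNat < m)
    (stval k : Int) (base : Nat → Int) :
    ∀ (fuel en : Nat) (mark : List Int) (cnt : Int),
      alls.length - en ≤ fuel → en ≤ fB alls (stval + k) → mark.length = m →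
      (∀ j, j < m → mark.getD j 0 = (cntIdx alls j en : Int) - base j) →
      cnt = (countGood mark : Int) →
      ∃ mark', fwWhile alls stval k fuel mark en cnt =
          (mark', fB alls (stval + k), (countGood mark' : Int)) ∧
        mark'.length = m ∧
        ∀ j, j < m → mark'.getD j 0 = (cntIdx alls j (fB alls (stval + k)) : Int) - base j := by
  intro fuel
  induction fuel with
  | zero =>
    intro en mark cnt hfuel hF hlen hinv hcnt
    have heq : en = fB alls (stval + k) := le_antisymm hF (by have := fB_le alls (stval + k); omega)
    refine ⟨mark, ?_, hlen, ?_⟩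
    · rw [fwWhile, heq, hcnt]
    · intro j hj
      rw [← heq]
      exact hinv j hj
  | succ fuel ih =>
    intro en mark cnt hfuel hF hlen hinv hcnt
    by_cases hen : en < fB alls (stval + k)
    · have henl : en < alls.length := lt_of_lt_of_le hen (fB_le alls _)
      have hval : (alls.getD en (0, 0)).1 - stval ≤ k := by
        rw [List.getD_eq_getElem _ _ henl]
        have := (prefix_iff alls hs (stval + k) en henl).mpr hen
        omega
      have hj2 : 0 ≤ (alls[en].2) ∧ (alls[en].2).toNat < m := hidx alls[en] (alls.getElem_mem henl)
      have hgd : alls.getD en (0, 0) = alls[en] := List.getD_eq_getElem _ _ henl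
      set j : Nat := (alls.getD en (0, 0)).2.toNat with hjdef
      have hjm : j < m := by rw [hjdef, hgd]; exact hj2.2
      have hjl : j < mark.length := by omega
      have hcast : ((j : Int)) = alls[en].2 := by
        rw [hjdef, hgd]
        exact Int.toNat_of_nonneg hj2.1
      rw [fwWhile]
      split_ifs with hc
      swap
      · exfalso
        simp only [Bool.and_eq_true, decide_eq_true_eq] at hc
        exact hc ⟨henl, hval⟩
      have hsetself : (mark.set j (mark.getD j 0 + 1)).getD j 0 = mark.getD j 0 + 1 :=
        getD_set_self mark j hjl _
      refine ih (en + 1) (mark.set j (mark.getD j 0 + 1))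
        (if (mark.set j (mark.getD j 0 + 1)).getD j 0 = 1 then cnt + 1 else cnt)
        (by omega) (by omega) (by simpa using hlen) ?_ ?_
      · intro j' hj'
        rw [cntIdx_succ alls j' en henl]
        by_cases hjj : j' = j
        · subst hjj
          rw [hsetself, hinv j hj', if_pos hcast.symm]
          push_cast
          ring
        · rw [getD_set_ne mark j j' (fun h => hjj h.symm), hinv j' hj']
          have hne : ¬ alls[en].2 = (j' : Int) := by
            rw [← hcast]
            simp only [Int.natCast_inj]
            exact fun h => hjj h.symm
          rw [if_neg hne]
          simp
      · have hmj : mark[j] = mark.getD j 0 := (List.getD_eq_getElem mark 0 hjl).symm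
        have hset := countGood_set mark j hjl (mark.getD j 0 + 1)
        rw [hmj] at hset
        rw [hsetself, hcnt]
        split_ifs at hset ⊢ <;> push_cast <;> omega
    · have heq : en = fB alls (stval + k) := le_antisymm hF (by omega)
      have hret : fwWhile alls stval k (fuel + 1) mark en cnt = (mark, en, cnt) := by
        rw [fwWhile]
        split_ifs with hc
        · exfalso
          simp only [Bool.and_eq_true, decide_eq_true_eq] at hc
          obtain ⟨henl, hval⟩ := hc
          have := (prefix_iff alls hs (stval + k) en henl).not.mpr (by omega)
          rw [List.getD_eq_getElem _ _ henl] at hval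
          omega
        · rfl
      refine ⟨mark, ?_, hlen, ?_⟩
      · rw [hret, heq, hcnt]
      · intro j hj
        rw [← heq]
        exact hinv j hj


lemma getD_replicate_zero (m j : Nat) : (List.replicate m (0 : Int)).getD j 0 = 0 := by
  by_cases hj : j < m
  · rw [List.getD_eq_getElem _ _ (by simpa using hj)]
    simp
  · exact List.getD_eq_default _ _ (by simpa using Nat.le_of_not_lt hj)

lemma sorted_getElem_mono (alls : List (Int × Int))
    (hs : alls.Pairwise (fun a b : Int × Int => a.1 ≤ b.1)) {a b : Nat}
    (hab : a ≤ b) (hb : b < alls.length) :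
    (alls[a]'(lt_of_le_of_lt hab hb)).1 ≤ alls[b].1 := by
  rcases Nat.lt_or_eq_of_le hab with h | h
  · exact List.pairwise_iff_getElem.mp hs a b (lt_of_le_of_lt hab hb) hb h
  · subst h; exact le_refl _

lemma mark_all_iff (mark : List Int) (m : Nat) (hlen : mark.length = m) :
    countGood mark = m ↔ ∀ j, j < m → 1 ≤ mark.getD j 0 := by
  unfold countGood
  rw [← hlen]
  constructor
  · intro h j hj
    have hall := List.countP_eq_length.mp h
    rw [List.getD_eq_getElem _ _ hj]
    simpa using hall _ (List.getElem_mem hj)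
  · intro h
    refine List.countP_eq_length.mpr ?_
    intro v hv
    obtain ⟨j, hj, rfl⟩ := List.mem_iff_getElem.mp hv
    have := h j hj
    rw [List.getD_eq_getElem _ _ hj] at this
    simpa using this

-- ---- the outer loop ----

lemma fwLoop_spec (alls : List (Int × Int)) (k : Int) (m : Nat)
    (hs : alls.Pairwise (fun a b : Int × Int => a.1 ≤ b.1))
    (hidx : ∀ pr ∈ alls, 0 ≤ pr.2 ∧ pr.2.toNat < m) :
    ∀ (c s : Nat) (mark : List Int) (en : Nat) (cnt : Int),
      s + c = alls.length → mark.length = m →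
      (∀ j, j < m → mark.getD j 0 = (cntIdx alls j en : Int) - (cntIdx alls j s : Int)) →
      cnt = (countGood mark : Int) →
      (s < alls.length → en ≤ fB alls ((alls.getD s (0, 0)).1 + k)) →
      (fwLoop alls k m (List.range' s c) mark en cnt = true ↔
        ∃ t, s ≤ t ∧ t < alls.length ∧ GoodT alls k m t) := by
  intro c
  induction c with
  | zero =>
    intro s mark en cnt hsum hlen hinv hcnt hen
    simp only [List.range'_zero, fwLoop]
    constructor
    · intro h; exact absurd h (by simp)
    · rintro ⟨t, h1, h2, _⟩; omega
  | succ c ih =>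
    intro s mark en cnt hsum hlen hinv hcnt hen
    have hsl : s < alls.length := by omega
    obtain ⟨mark', hw, hlen', hinv'⟩ :=
      fwWhile_spec alls m hs hidx ((alls.getD s (0, 0)).1) k
        (fun j => (cntIdx alls j s : Int)) alls.length en mark cnt
        (by omega) (hen hsl) hlen hinv hcnt
    simp only [List.range'_succ, fwLoop, hw]
    have hGS : countGood mark' = m ↔ GoodT alls k m s := by
      rw [mark_all_iff mark' m hlen']
      unfold GoodT
      constructor
      · intro h j hj
        have := h j hj
        rw [hinv' j hj] at this
        omega
      · intro h j hj
        rw [hinv' j hj]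
        have := h j hj
        omega
    by_cases hdone : countGood mark' = m
    · rw [if_pos (by exact_mod_cast hdone : (countGood mark' : Int) = (m : Int))]
      exact iff_of_true rfl ⟨s, le_rfl, hsl, hGS.mp hdone⟩
    · rw [if_neg (by exact_mod_cast hdone : ¬ (countGood mark' : Int) = (m : Int))]
      have hj2 : 0 ≤ (alls[s].2) ∧ (alls[s].2).toNat < m := hidx alls[s] (alls.getElem_mem hsl)
      have hgd : alls.getD s (0, 0) = alls[s] := List.getD_eq_getElem _ _ hsl
      set j0 : Nat := (alls.getD s (0, 0)).2.toNat with hj0def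
      have hj0m : j0 < m := by rw [hj0def, hgd]; exact hj2.2
      have hj0l : j0 < mark'.length := by omega
      have hcast : ((j0 : Int)) = alls[s].2 := by
        rw [hj0def, hgd]
        exact Int.toNat_of_nonneg hj2.1
      have hsetself : (mark'.set j0 (mark'.getD j0 0 - 1)).getD j0 0 = mark'.getD j0 0 - 1 :=
        getD_set_self mark' j0 hj0l _
      have hrec := ih (s + 1) (mark'.set j0 (mark'.getD j0 0 - 1))
        (fB alls ((alls.getD s (0, 0)).1 + k))
        (if (mark'.set j0 (mark'.getD j0 0 - 1)).getD j0 0 = 0 then (countGood mark' : Int) - 1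
         else (countGood mark' : Int))
        (by omega) (by simpa using hlen') ?_ ?_ ?_
      · rw [hrec]
        have hnotS : ¬ GoodT alls k m s := fun h => hdone (hGS.mpr h)
        constructor
        · rintro ⟨t, h1, h2, h3⟩
          exact ⟨t, by omega, h2, h3⟩
        · rintro ⟨t, h1, h2, h3⟩
          rcases Nat.eq_or_lt_of_le h1 with rfl | h1'
          · exact absurd h3 hnotS
          · exact ⟨t, by omega, h2, h3⟩
      · intro j' hj'
        rw [cntIdx_succ alls j' s hsl]
        by_cases hjj : j' = j0
        · subst hjj
          rw [hsetself, hinv' j0 hj', if_pos hcast.symm]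
          push_cast
          ring
        · rw [getD_set_ne mark' j0 j' (fun h => hjj h.symm), hinv' j' hj']
          have hne : ¬ alls[s].2 = (j' : Int) := by
            rw [← hcast]
            simp only [Int.natCast_inj]
            exact fun h => hjj h.symm
          rw [if_neg hne]
          simp
      · have hmj : mark'[j0] = mark'.getD j0 0 := (List.getD_eq_getElem mark' 0 hj0l).symm
        have hset := countGood_set mark' j0 hj0l (mark'.getD j0 0 - 1)
        rw [hmj] at hset
        rw [hsetself]
        split_ifs at hset ⊢ <;> push_cast <;> omega
      · intro hs1
        have hmono : (alls.getD s (0, 0)).1 + k ≤ (alls.getD (s + 1) (0, 0)).1 + k := by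
          rw [hgd, List.getD_eq_getElem _ _ hs1]
          have := sorted_getElem_mono alls hs (Nat.le_succ s) hs1
          simp only [Nat.succ_eq_add_one] at this
          omega
        exact fB_mono alls hmono

-- ---- characterizations ----

lemma find_window_char (post : List (List Int)) (k : Int) :
    find_window post k = true ↔
      ∃ t, t < (PySem.List.sorted2 (allsSpec post 0) Prod.fst Prod.snd).length ∧
        GoodT (PySem.List.sorted2 (allsSpec post 0) Prod.fst Prod.snd) k post.length t := by
  have hbuild : (post.foldl (fun (acc : List (Int × Int) × Int) l =>
      (l.foldl (fun a i => a ++ [(i, acc.2)]) acc.1, acc.2 + 1)) ([], 0)).1 = allsSpec post 0 := by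
    simpa using build_alls post [] 0
  unfold find_window
  rw [hbuild]
  show fwLoop (PySem.List.sorted2 (allsSpec post 0) Prod.fst Prod.snd) k post.length
      (List.range (PySem.List.sorted2 (allsSpec post 0) Prod.fst Prod.snd).length)
      (List.replicate post.length 0) 0 0 = true ↔ _
  rw [List.range_eq_range']
  have hidx : ∀ pr ∈ PySem.List.sorted2 (allsSpec post 0) Prod.fst Prod.snd,
      0 ≤ pr.2 ∧ pr.2.toNat < post.length := by
    rintro ⟨v, j⟩ hpr
    rw [List.Perm.mem_iff (PySem.List.sorted2_perm (allsSpec post 0) Prod.fst Prod.snd false)] at hpr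
    obtain ⟨t, ht, hj, _⟩ := (mem_allsSpec post 0 v j).mp hpr
    constructor <;> simp only [] <;> omega
  rw [fwLoop_spec (PySem.List.sorted2 (allsSpec post 0) Prod.fst Prod.snd) k post.length
    (sorted2_pairwise _) hidx _ 0 _ 0 0 (by omega) (by simp) ?_ ?_ (fun _ => Nat.zero_le _)]
  · constructor
    · rintro ⟨t, _, h2, h3⟩; exact ⟨t, h2, h3⟩
    · rintro ⟨t, h2, h3⟩; exact ⟨t, Nat.zero_le t, h2, h3⟩
  · intro j hj
    rw [getD_replicate_zero, cntIdx_zero]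
    simp
  · rw [countGood_replicate]
    simp

lemma find_window_alt_char (post : List (List Int)) (k : Int) :
    find_window_alt post k = true ↔
      ∃ row ∈ post, ∃ x ∈ row, ∀ l ∈ post, ∃ y ∈ l, x ≤ y ∧ y ≤ x + k := by
  simp [find_window_alt, List.any_eq_true, List.all_eq_true]

lemma bridge (post : List (List Int)) (k : Int) :
    (∃ t, t < (PySem.List.sorted2 (allsSpec post 0) Prod.fst Prod.snd).length ∧
        GoodT (PySem.List.sorted2 (allsSpec post 0) Prod.fst Prod.snd) k post.length t) ↔
      ∃ row ∈ post, ∃ x ∈ row, ∀ l ∈ post, ∃ y ∈ l, x ≤ y ∧ y ≤ x + k := by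
  set alls := PySem.List.sorted2 (allsSpec post 0) Prod.fst Prod.snd with hallsdef
  have hs : alls.Pairwise (fun a b : Int × Int => a.1 ≤ b.1) := sorted2_pairwise _
  have halls : ∀ (v j : Int), (v, j) ∈ alls ↔
      ∃ (t : Nat) (ht : t < post.length), j = (t : Int) ∧ v ∈ post[t] := by
    intro v j
    rw [hallsdef,
      List.Perm.mem_iff (PySem.List.sorted2_perm (allsSpec post 0) Prod.fst Prod.snd false),
      mem_allsSpec]
    simp
  constructor
  · rintro ⟨t, htl, hg⟩
    have hmemx : (alls[t].1, alls[t].2) ∈ alls := by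
      simpa using List.getElem_mem htl
    obtain ⟨t0, ht0, hj0, hx0⟩ := (halls alls[t].1 alls[t].2).mp hmemx
    refine ⟨post[t0], List.getElem_mem ht0, alls[t].1, hx0, ?_⟩
    intro l hl
    obtain ⟨j, hj, rfl⟩ := List.mem_iff_getElem.mp hl
    have hgj := hg j hj
    rw [List.getD_eq_getElem _ _ htl] at hgj
    obtain ⟨p, hpl, htp, hpF, hpj⟩ :=
      (cntIdx_lt_iff alls j t _ (fB_le alls _)).mp hgj
    have hmemy : (alls[p].1, alls[p].2) ∈ alls := by
      simpa using List.getElem_mem hpl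
    obtain ⟨t1, ht1, hj1, hy1⟩ := (halls alls[p].1 alls[p].2).mp hmemy
    have ht1j : t1 = j := by
      rw [hj1] at hpj
      exact_mod_cast hpj
    subst ht1j
    refine ⟨alls[p].1, hy1, ?_, ?_⟩
    · exact sorted_getElem_mono alls hs htp hpl
    · exact (prefix_iff alls hs _ p hpl).mpr hpF
  · rintro ⟨row, hrow, x, hx, hcov⟩
    obtain ⟨j0, hj0, rfl⟩ := List.mem_iff_getElem.mp hrow
    have hxmem : (x, (j0 : Int)) ∈ alls := (halls x j0).mpr ⟨j0, hj0, rfl, hx⟩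
    obtain ⟨q, hq, hqe⟩ := List.mem_iff_getElem.mp hxmem
    set t := (alls.takeWhile (fun a => decide (a.1 < x))).length with htdef
    have htq : t ≤ q := by
      by_contra hcon
      have := takeWhile_getD_true (fun a => decide (a.1 < x)) alls q (by omega)
      rw [List.getD_eq_getElem _ _ hq, hqe] at this
      simp at this
    have htl : t < alls.length := by omega
    have htx : alls[t].1 = x := by
      have h1 := takeWhile_getD_false (fun a => decide (a.1 < x)) alls htl
      rw [List.getD_eq_getElem _ _ htl] at h1
      simp only [decide_eq_false_iff_not, not_lt] at h1
      have h2 := sorted_getElem_mono alls hs htq hq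
      rw [hqe] at h2
      simp only at h2
      omega
    refine ⟨t, htl, ?_⟩
    intro j hj
    obtain ⟨y, hy, hxy, hyk⟩ := hcov post[j] (List.getElem_mem hj)
    have hymem : (y, (j : Int)) ∈ alls := (halls y j).mpr ⟨j, hj, rfl, hy⟩
    obtain ⟨p, hp, hpe⟩ := List.mem_iff_getElem.mp hymem
    have htp : t ≤ p := by
      by_contra hcon
      have := takeWhile_getD_true (fun a => decide (a.1 < x)) alls p (by omega)
      rw [List.getD_eq_getElem _ _ hp, hpe] at this
      simp only [decide_eq_true_eq] at this
      omega
    have hpF : p < fB alls ((alls.getD t (0, 0)).1 + k) := by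
      rw [List.getD_eq_getElem _ _ htl, htx]
      refine (prefix_iff alls hs (x + k) p hp).mp ?_
      rw [hpe]
      simpa using hyk
    refine (cntIdx_lt_iff alls j t _ (fB_le alls _)).mpr ⟨p, hp, htp, hpF, ?_⟩
    rw [hpe]

-- ===== VERDICT (by name: the statement is the Claim_ definition above) =====
theorem find_window_spec : Claim_equal_find_window := by
  unfold Claim_equal_find_window Spec_find_window
  intro post k _
  rw [Bool.eq_iff_iff, find_window_char, bridge, find_window_alt_char]
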